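-- pv_equiv track=rewrite | github.com/0xhoang/tour-of-python | lecture05-array/ManageLALA.py | plain_learning
-- ===== SOURCE A (Python) =====
-- def plain_learning(n, arr):
--     prev = arr[0]
--
--     check_computer = 0
--     if prev == 0:
--         check_computer += 1
--
--     for i in range(1, n):
--         if arr[i] != prev:
--             if arr[i] == 0:
--                 check_computer = 1
--             else:
--                 check_computer = 0
--
--             prev = arr[i]
--             continue
--
--         if arr[i] == prev and arr[i] == 0:
--             check_computer += 1
--             prev = arr[i]
--
--             if check_computer > 3:
--                 return "NO"
--
--     if arr[n - 1] != 1: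
--         return "NO"
--
--     return "YES"
-- ===== SOURCE B (Python) =====
-- def plain_learning(n, arr):
--     zs = arr[:n]
--     if any(w == (0, 0, 0, 0) for w in zip(zs, zs[1:], zs[2:], zs[3:])):
--         return "NO"
--     return "YES" if arr[n - 1] == 1 else "NO"
-- ===== Notes on version B (the rewrite author's own statement) =====
-- stated objective: alternative
-- what changed: A's inline prev/check_computer state machine is replaced by a declarative sliding-window test: B zips arr[:n] with its three shifted copies and asks whether any 4-window equals (0,0,0,0), then checks arr[n-1] == 1.
-- outside the precondition, e.g. on plain_learning(-1, [0, 0, 0, 0, 1, 1]): A returns 'YES', B returns 'NO'; on plain_learning(10, [0, 0, 0, 0]): A returns 'NO', B returns 'NO'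
import Mathlib
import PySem

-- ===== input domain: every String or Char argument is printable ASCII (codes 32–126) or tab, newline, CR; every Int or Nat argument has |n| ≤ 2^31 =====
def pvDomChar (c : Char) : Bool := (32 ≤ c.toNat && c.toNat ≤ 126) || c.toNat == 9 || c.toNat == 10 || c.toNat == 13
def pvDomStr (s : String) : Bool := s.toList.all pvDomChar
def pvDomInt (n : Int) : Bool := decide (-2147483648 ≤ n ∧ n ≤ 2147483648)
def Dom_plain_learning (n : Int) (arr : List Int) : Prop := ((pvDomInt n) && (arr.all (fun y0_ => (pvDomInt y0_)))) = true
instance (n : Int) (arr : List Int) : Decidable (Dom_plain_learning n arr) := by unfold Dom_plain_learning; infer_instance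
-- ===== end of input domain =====

-- B replaces A's prev/counter state machine with a sliding-window test ("does arr[:n] contain
-- four consecutive zeros?") via zip of shifted copies; alternative decomposition, same O(n) cost.

-- ===== PORT A =====
-- one loop iteration of A: state = some (prev, check_computer), none = early `return "NO"`
def pvStepA (arr : List Int) (st : Option (Int × Int)) (i : Int) : Option (Int × Int) :=
  match st with
  | none => none
  | some (prev, check) =>
    let ai := PySem.List.pyGetD arr i 0
    if ai ≠ prev then some (ai, if ai = 0 then 1 else 0)
    else if ai = prev ∧ ai = 0 then
      (if check + 1 > 3 then none else some (ai, check + 1))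
    else some (prev, check)

def plain_learning (n : Int) (arr : List Int) : String :=
  let prev := PySem.List.pyGetD arr 0 0
  let check : Int := if prev = 0 then 1 else 0
  match (PySem.List.pyRange 1 n 1).foldl (pvStepA arr) (some (prev, check)) with
  | none => "NO"
  | some _ => if PySem.List.pyGetD arr (n - 1) 0 ≠ 1 then "NO" else "YES"

-- ===== PORT B =====
-- zip(zs, zs[1:], zs[2:], zs[3:]) (4-ary zip, ported by hand: exact — stops at the shortest list)
def pvZip4 : List Int → List Int → List Int → List Int → List (Int × Int × Int × Int)
  | a :: as, b :: bs, c :: cs, d :: ds => (a, b, c, d) :: pvZip4 as bs cs ds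
  | _, _, _, _ => []

def plain_learning_alt (n : Int) (arr : List Int) : String :=
  let zs := PySem.List.slice arr none (some n)
  if (pvZip4 zs (PySem.List.slice zs (some 1) none) (PySem.List.slice zs (some 2) none)
        (PySem.List.slice zs (some 3) none)).any (fun w => w == (0, 0, 0, 0)) then "NO"
  else if PySem.List.pyGetD arr (n - 1) 0 = 1 then "YES" else "NO"

-- ===== PRECONDITION & SPEC =====
-- Pre_ restricts to the natural domain 0 ≤ n ≤ len(arr) on a nonempty arr: A raises IndexError on
-- arr = [] and (unless an early "NO" fires first) whenever n > len(arr) or n - 1 < -len(arr); for the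
-- remaining negative n A's value comes from an empty loop plus negative-index wraparound of arr[n-1],
-- an accident of Python indexing that B (which scans arr[:n]) does not reproduce.
def Pre_plain_learning (n : Int) (arr : List Int) : Prop :=
  arr ≠ [] ∧ 0 ≤ n ∧ n ≤ (arr.length : Int)
instance (n : Int) (arr : List Int) : Decidable (Pre_plain_learning n arr) := by
  unfold Pre_plain_learning; infer_instance

def pvWitness_plain_learning : Int × List Int := (4, [0, 0, 1, 1])

def Spec_plain_learning (n : Int) (arr : List Int) (out : String) : Prop := out = plain_learning_alt n arr
instance (n : Int) (arr : List Int) (out : String) : Decidable (Spec_plain_learning n arr out) := by unfold Spec_plain_learning; infer_instance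

-- ===== CLAIM (what is proved, stated in full; the proofs are below) =====
def Claim_equal_plain_learning : Prop := ∀ (n : Int) (arr : List Int), Dom_plain_learning n arr → Pre_plain_learning n arr → Spec_plain_learning n arr (plain_learning n arr)

-- ===== LEMMAS AND PROOFS =====

-- proof-side helpers --------------------------------------------------------

-- A's loop body, taking the element value instead of the index
def pvStepE (st : Option (Int × Int)) (x : Int) : Option (Int × Int) :=
  match st with
  | none => none
  | some (prev, check) =>
    if x ≠ prev then some (x, if x = 0 then 1 else 0)
    else if x = prev ∧ x = 0 then
      (if check + 1 > 3 then none else some (x, check + 1))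
    else some (prev, check)

-- "the scan, starting with a current zero-run of length c, hits a run longer than 3"
def pvCnt (c : Int) : List Int → Bool
  | [] => false
  | x :: xs => if x = 0 then (if c + 1 > 3 then true else pvCnt (c + 1) xs) else pvCnt 0 xs

-- "the list contains four consecutive zeros"
def pvHasZ4 : List Int → Bool
  | x :: y :: z :: w :: rest =>
      if x = 0 ∧ y = 0 ∧ z = 0 ∧ w = 0 then true else pvHasZ4 (y :: z :: w :: rest)
  | _ => false

lemma pvStepA_eq_stepE (arr : List Int) (st : Option (Int × Int)) (i : Int) :
    pvStepA arr st i = pvStepE st (PySem.List.pyGetD arr i 0) := by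
  cases st with
  | none => rfl
  | some p => rfl

lemma pvFoldl_range (arr : List Int) (k : Nat) :
    ∀ (i : Int) (st : Option (Int × Int)), 0 ≤ i → i.toNat + k ≤ arr.length →
      (PySem.List.pyRange i (i + (k : Int)) 1).foldl (pvStepA arr) st
        = ((arr.drop i.toNat).take k).foldl pvStepE st := by
  induction k with
  | zero =>
    intro i st h0 hlen
    simp
  | succ k ih =>
    intro i st h0 hlen
    have hi : i < i + ((k : Int) + 1) := by omega
    have hlt : i.toNat < arr.length := by omega
    have hcast : (((k+1) : Nat) : Int) = (k : Int) + 1 := by push_cast; ring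
    rw [hcast, PySem.List.pyRange_one_cons hi]
    have hdrop : arr.drop i.toNat = arr[i.toNat] :: arr.drop (i.toNat + 1) :=
      (List.getElem_cons_drop hlt).symm
    rw [hdrop, List.take_succ_cons, List.foldl_cons, List.foldl_cons]
    rw [pvStepA_eq_stepE, PySem.List.pyGetD_eq_getElem arr 0 h0 (by omega)]
    have he : i + ((k : Int) + 1) = (i + 1) + (k : Int) := by ring
    rw [he]
    rw [ih (i + 1) (pvStepE st arr[i.toNat]) (by omega) (by omega),
      show (i + 1).toNat = i.toNat + 1 by omega]

lemma pvFoldl_stepE_none (xs : List Int) : xs.foldl pvStepE none = none := by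
  induction xs with
  | nil => rfl
  | cons x xs ih => simpa [pvStepE] using ih

lemma pvScan_none (xs : List Int) : ∀ (prev check : Int),
    (xs.foldl pvStepE (some (prev, check)) = none)
      ↔ (pvCnt (if prev = 0 then check else 0) xs = true) := by
  induction xs with
  | nil => intro prev check; simp [pvCnt]
  | cons x xs ih =>
    intro prev check
    rw [List.foldl_cons]
    by_cases hxp : x = prev
    · subst hxp
      by_cases hx0 : x = 0
      · subst hx0
        by_cases hb : check + 1 > 3
        · have h1 : pvStepE (some ((0:Int), check)) 0 = none := by simp [pvStepE, hb]
          rw [h1]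
          have habs : List.foldl pvStepE none xs = none := pvFoldl_stepE_none xs
          simp [habs, pvCnt, hb]
        · have h1 : pvStepE (some ((0:Int), check)) 0 = some (0, check + 1) := by
            simp [pvStepE, hb]
          rw [h1, ih]
          simp [pvCnt, hb]
      · have h1 : pvStepE (some (x, check)) x = some (x, check) := by
          simp [pvStepE, hx0]
        rw [h1, ih]
        simp [pvCnt, hx0]
    · by_cases hx0 : x = 0
      · subst hx0
        have hp0 : prev ≠ 0 := fun h => hxp h.symm
        have h1 : pvStepE (some (prev, check)) 0 = some (0, 1) := by
          simp [pvStepE, hxp]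
        rw [h1, ih]
        simp [pvCnt, hp0]
      · have h1 : pvStepE (some (prev, check)) x = some (x, 0) := by
          simp [pvStepE, hxp, hx0]
        rw [h1, ih]
        simp [pvCnt, hx0]

lemma pvHasZ4_cons_ne {x : Int} (xs : List Int) (hx : x ≠ 0) :
    pvHasZ4 (x :: xs) = pvHasZ4 xs := by
  match xs with
  | [] => simp [pvHasZ4]
  | [y] => simp [pvHasZ4]
  | [y, z] => simp [pvHasZ4]
  | y :: z :: w :: r => simp [pvHasZ4, hx]

lemma pvHasZ4_z1 {x : Int} (xs : List Int) (hx : x ≠ 0) :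
    pvHasZ4 (0 :: x :: xs) = pvHasZ4 (x :: xs) := by
  match xs with
  | [] => simp [pvHasZ4]
  | [y] => simp [pvHasZ4]
  | y :: z :: r => simp [pvHasZ4, hx]

lemma pvHasZ4_z2 {x : Int} (xs : List Int) (hx : x ≠ 0) :
    pvHasZ4 (0 :: 0 :: x :: xs) = pvHasZ4 (0 :: x :: xs) := by
  match xs with
  | [] => simp [pvHasZ4]
  | y :: r => simp [pvHasZ4, hx]

lemma pvHasZ4_z3 {x : Int} (xs : List Int) (hx : x ≠ 0) :
    pvHasZ4 (0 :: 0 :: 0 :: x :: xs) = pvHasZ4 (0 :: 0 :: x :: xs) := by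
  simp [pvHasZ4, hx]

lemma pvHasZ4_rep_ne {x : Int} (xs : List Int) (hx : x ≠ 0) (k : Nat) (hk : k ≤ 3) :
    pvHasZ4 (List.replicate k 0 ++ x :: xs) = pvHasZ4 xs := by
  interval_cases k
  · simpa using pvHasZ4_cons_ne xs hx
  · simp only [List.replicate, List.cons_append, List.nil_append]
    rw [pvHasZ4_z1 xs hx, pvHasZ4_cons_ne xs hx]
  · simp only [List.replicate, List.cons_append, List.nil_append]
    rw [pvHasZ4_z2 xs hx, pvHasZ4_z1 xs hx, pvHasZ4_cons_ne xs hx]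
  · simp only [List.replicate, List.cons_append, List.nil_append]
    rw [pvHasZ4_z3 xs hx, pvHasZ4_z2 xs hx, pvHasZ4_z1 xs hx, pvHasZ4_cons_ne xs hx]

lemma pvCnt_eq_hasZ4 (xs : List Int) : ∀ (c : Int), 0 ≤ c → c ≤ 3 →
    pvCnt c xs = pvHasZ4 (List.replicate c.toNat 0 ++ xs) := by
  induction xs with
  | nil =>
    intro c h0 h3
    have : c.toNat ≤ 3 := by omega
    interval_cases h : c.toNat <;> simp [pvCnt, pvHasZ4]
  | cons x xs ih =>
    intro c h0 h3
    by_cases hx : x = 0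
    · subst hx
      by_cases hb : c + 1 > 3
      · have hc : c = 3 := by omega
        subst hc
        simp [pvCnt, pvHasZ4, show (3:Int).toNat = 3 from rfl, List.replicate]
      · have h1 : pvCnt c (0 :: xs) = pvCnt (c + 1) xs := by simp [pvCnt, hb]
        rw [h1, ih (c+1) (by omega) (by omega)]
        have : List.replicate c.toNat (0:Int) ++ 0 :: xs = List.replicate (c+1).toNat 0 ++ xs := by
          have : (c+1).toNat = c.toNat + 1 := by omega
          rw [this, List.replicate_succ']
          simp
        rw [this]
    · have h1 : pvCnt c (x :: xs) = pvCnt 0 xs := by simp [pvCnt, hx]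
      rw [h1, ih 0 le_rfl (by omega)]
      simp only [Int.toNat_zero, List.replicate, List.nil_append]
      rw [pvHasZ4_rep_ne xs hx c.toNat (by omega)]

lemma pvZip4_any (xs : List Int) :
    (pvZip4 xs (xs.drop 1) (xs.drop 2) (xs.drop 3)).any (fun w => w == (0, 0, 0, 0))
      = pvHasZ4 xs := by
  induction xs with
  | nil => rfl
  | cons a t ih =>
    match t, ih with
    | [], _ => rfl
    | [b], _ => rfl
    | [b, c], _ => rfl
    | b :: c :: d :: r, ih =>
      simp only [List.drop] at ih ⊢
      simp only [pvZip4, List.any_cons, ih, pvHasZ4]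
      by_cases h : a = 0 ∧ b = 0 ∧ c = 0 ∧ d = 0
      · obtain ⟨h1,h2,h3,h4⟩ := h; simp [h1,h2,h3,h4]
      · simp only [if_neg h]
        have : ((a, b, c, d) == ((0 : Int), (0 : Int), (0 : Int), (0 : Int))) = false := by
          simp only [beq_eq_false_iff_ne]; intro he; apply h; injection he with h1 h2; injection h2 with h2 h3; injection h3 with h3 h4; exact ⟨h1, h2, h3, h4⟩
        simp [this]

-- the two ports, each rewritten as the same window test plus the same last-element test
lemma pvA_eq (n : Int) (arr : List Int) (h : Pre_plain_learning n arr) :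
    plain_learning n arr
      = if pvHasZ4 (arr.take n.toNat) then "NO"
        else if PySem.List.pyGetD arr (n - 1) 0 ≠ 1 then "NO" else "YES" := by
  obtain ⟨hne, hn0, hnlen⟩ := h
  match arr, hne with
  | a :: t, _ =>
    by_cases hn : n = 0
    · subst hn
      simp [plain_learning, pvHasZ4]
    · have h1 : (1 : Int) ≤ n := by omega
      have hk : n = 1 + (((n.toNat - 1 : Nat)) : Int) := by omega
      have hfold : (PySem.List.pyRange 1 n 1).foldl (pvStepA (a :: t))
            (some (PySem.List.pyGetD (a :: t) 0 0, if PySem.List.pyGetD (a :: t) 0 0 = 0 then 1 else 0))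
          = (t.take (n.toNat - 1)).foldl pvStepE (some (a, if a = 0 then 1 else 0)) := by
        rw [hk, pvFoldl_range (a :: t) (n.toNat - 1) 1 _ (by omega) (by simp at hnlen ⊢; omega)]
        simp only [PySem.List.pyGetD_zero_cons, show Int.toNat 1 = 1 from rfl, List.drop_succ_cons, List.drop_zero]
        rw [show ((1 + (((n.toNat - 1 : Nat)) : Int))).toNat - 1 = n.toNat - 1 by omega]
      have htake : (a :: t).take n.toNat = a :: t.take (n.toNat - 1) := by
        have : n.toNat = (n.toNat - 1) + 1 := by omega
        rw [this, List.take_succ_cons]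
        simp
      have hcnt : pvCnt (if a = 0 then 1 else 0) (t.take (n.toNat - 1))
          = pvHasZ4 ((a :: t).take n.toNat) := by
        rw [htake]
        by_cases ha : a = 0
        · subst ha
          rw [if_pos rfl, pvCnt_eq_hasZ4 _ 1 (by omega) (by omega)]
          simp
        · rw [if_neg ha, pvCnt_eq_hasZ4 _ 0 le_rfl (by omega)]
          simp [pvHasZ4_cons_ne _ ha]
      show (match (PySem.List.pyRange 1 n 1).foldl (pvStepA (a :: t))
            (some (PySem.List.pyGetD (a :: t) 0 0, if PySem.List.pyGetD (a :: t) 0 0 = 0 then 1 else 0)) with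
        | none => "NO"
        | some _ => if PySem.List.pyGetD (a :: t) (n - 1) 0 ≠ 1 then "NO" else "YES") = _
      rw [hfold]
      have hcol : (if a = 0 then (if a = 0 then (1:Int) else 0) else 0) = (if a = 0 then 1 else 0) := by
        by_cases ha : a = 0 <;> simp [ha]
      by_cases hz : pvHasZ4 ((a :: t).take n.toNat) = true
      · have : (t.take (n.toNat - 1)).foldl pvStepE (some (a, if a = 0 then 1 else 0)) = none := by
          rw [pvScan_none, hcol, hcnt]
          exact hz
        rw [this, if_pos hz]
      · have hnn : ¬ ((t.take (n.toNat - 1)).foldl pvStepE (some (a, if a = 0 then 1 else 0)) = none) := by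
          rw [pvScan_none, hcol, hcnt]
          simpa using hz
        cases hF : (t.take (n.toNat - 1)).foldl pvStepE (some (a, if a = 0 then 1 else 0)) with
        | none => exact absurd hF hnn
        | some p => simp [hz]

lemma pvB_eq (n : Int) (arr : List Int) (h : Pre_plain_learning n arr) :
    plain_learning_alt n arr
      = if pvHasZ4 (arr.take n.toNat) then "NO"
        else if PySem.List.pyGetD arr (n - 1) 0 = 1 then "YES" else "NO" := by
  obtain ⟨hne, hn0, hnlen⟩ := h
  show (if (pvZip4 (PySem.List.slice arr none (some n))
          (PySem.List.slice (PySem.List.slice arr none (some n)) (some 1) none)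
          (PySem.List.slice (PySem.List.slice arr none (some n)) (some 2) none)
          (PySem.List.slice (PySem.List.slice arr none (some n)) (some 3) none)).any
          (fun w => w == (0, 0, 0, 0)) then "NO"
      else if PySem.List.pyGetD arr (n - 1) 0 = 1 then "YES" else "NO") = _
  rw [PySem.List.slice_to arr hn0,
    PySem.List.slice_from _ (by norm_num : (0:Int) ≤ 1),
    PySem.List.slice_from _ (by norm_num : (0:Int) ≤ 2),
    PySem.List.slice_from _ (by norm_num : (0:Int) ≤ 3)]
  rw [show ((1:Int)).toNat = 1 from rfl, show ((2:Int)).toNat = 2 from rfl,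
    show ((3:Int)).toNat = 3 from rfl]
  rw [pvZip4_any]

-- ===== VERDICT (by name: the statement is the Claim_ definition above) =====
theorem plain_learning_spec : Claim_equal_plain_learning := by
  intro n arr _ hpre
  unfold Spec_plain_learning
  rw [pvA_eq n arr hpre, pvB_eq n arr hpre]
  by_cases h4 : pvHasZ4 (arr.take n.toNat) = true
  · simp [h4]
  · by_cases h1 : PySem.List.pyGetD arr (n - 1) 0 = 1 <;>
      simp [h4, h1]
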